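-- pv_equiv track=rewrite | github.com/sourabpramanik/Leetcode | problems/reverse_words_in_a_string/solution.py | trim_side
-- ===== SOURCE A (Python) =====
-- def trim_side(arr):
--     if "".join(arr).isspace():
--         return []
--
--     l=0
--     r=len(arr)-1
--
--     while l<r and arr[l].isspace():l+=1
--     while l<r and arr[r].isspace():r-=1
--
--     return arr[l:r+1]
-- ===== SOURCE B (Python) =====
-- def trim_side(arr):
--     if "".join(arr).isspace():
--         return []
--     first = None
--     last = None
--     for i, x in enumerate(arr):
--         if not x.isspace():
--             if first is None:
--                 first = i
--             last = i
--     if first is None: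
--         return []
--     return arr[first:last + 1]
-- ===== Notes on version B (the rewrite author's own statement) =====
-- stated objective: alternative
-- what changed: Replaces A's two boundary-shrinking while-loops over indices with a single forward scan (enumerate) that records the first and last non-whitespace indices and slices once.
import Mathlib
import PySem

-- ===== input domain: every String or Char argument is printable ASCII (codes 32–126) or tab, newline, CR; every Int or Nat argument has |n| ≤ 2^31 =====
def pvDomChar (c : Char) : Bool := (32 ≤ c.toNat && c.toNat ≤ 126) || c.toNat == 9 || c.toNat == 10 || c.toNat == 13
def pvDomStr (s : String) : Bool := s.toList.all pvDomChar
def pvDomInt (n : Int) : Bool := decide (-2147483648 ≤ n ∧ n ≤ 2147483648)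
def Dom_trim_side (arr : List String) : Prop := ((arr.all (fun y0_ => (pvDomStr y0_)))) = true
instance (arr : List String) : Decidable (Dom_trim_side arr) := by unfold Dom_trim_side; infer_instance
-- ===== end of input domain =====

-- B replaces A's two boundary-shrinking while-loops with one forward scan that records the
-- first and last non-whitespace indices, then slices once (objective: alternative).

-- ===== PORT A =====
-- while l<r and arr[l].isspace(): l+=1   (the index is always in range when read, so pyGetD is exact)
def trimLoopL (arr : List String) (r l : Int) : Int :=
  if h : l < r ∧ PySem.Str.strIsspace (PySem.List.pyGetD arr l "") then
    trimLoopL arr r (l + 1)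
  else l
termination_by (r - l).toNat
decreasing_by omega

-- while l<r and arr[r].isspace(): r-=1
def trimLoopR (arr : List String) (l r : Int) : Int :=
  if h : l < r ∧ PySem.Str.strIsspace (PySem.List.pyGetD arr r "") then
    trimLoopR arr l (r - 1)
  else r
termination_by (r - l).toNat
decreasing_by omega

def trim_side (arr : List String) : List String :=
  if PySem.Str.strIsspace (PySem.Str.join "" arr) then []
  else
    let l := trimLoopL arr ((arr.length : Int) - 1) 0
    let r := trimLoopR arr l ((arr.length : Int) - 1)
    PySem.List.slice arr (some l) (some (r + 1))

-- ===== PORT B =====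
-- loop body of B's single forward pass; state = (first, last)
def bStep (st : Option Int × Option Int) (p : Int × String) : Option Int × Option Int :=
  if !PySem.Str.strIsspace p.2 then
    ((match st.1 with | none => some p.1 | some f => some f), some p.1)
  else st

def trim_side_alt (arr : List String) : List String :=
  if PySem.Str.strIsspace (PySem.Str.join "" arr) then []
  else
    let fl := (PySem.List.enumerate arr 0).foldl bStep (none, none)
    match fl.1, fl.2 with
    | some f, some l => PySem.List.slice arr (some f) (some (l + 1))
    | _, _ => []

-- ===== PRECONDITION & SPEC =====
def Spec_trim_side (arr : List String) (out : List String) : Prop := out = trim_side_alt arr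
instance (arr : List String) (out : List String) : Decidable (Spec_trim_side arr out) := by unfold Spec_trim_side; infer_instance

-- ===== CLAIM (what is proved, stated in full; the proofs are below) =====
def Claim_equal_trim_side : Prop := ∀ (arr : List String), Dom_trim_side arr → Spec_trim_side arr (trim_side arr)

-- ===== LEMMAS AND PROOFS =====

-- proof-side helpers: index of the first / last non-whitespace string
def firstIdx? : List String → Option Nat
  | [] => none
  | x :: xs => if PySem.Str.strIsspace x then (firstIdx? xs).map (· + 1) else some 0

def lastIdx? : List String → Option Nat
  | [] => none
  | x :: xs =>
    match lastIdx? xs with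
    | some k => some (k + 1)
    | none => if PySem.Str.strIsspace x then none else some 0



lemma firstIdx?_eq_none (xs : List String) (h : firstIdx? xs = none) :
    ∀ x ∈ xs, PySem.Str.strIsspace x = true := by
  induction xs with
  | nil => simp
  | cons x xs ih =>
    rw [firstIdx?] at h
    by_cases hx : PySem.Str.strIsspace x = true
    · rw [if_pos hx] at h
      intro y hy
      rcases List.mem_cons.1 hy with rfl | hy
      · exact hx
      · exact ih (by cases h' : firstIdx? xs <;> simp [h'] at h ⊢) y hy
    · rw [if_neg hx] at h
      simp at h

lemma firstIdx?_spec (xs : List String) (f : Nat) (h : firstIdx? xs = some f) :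
    f < xs.length ∧ PySem.Str.strIsspace (xs.getD f "") = false ∧
      ∀ j < f, PySem.Str.strIsspace (xs.getD j "") = true := by
  induction xs generalizing f with
  | nil => simp [firstIdx?] at h
  | cons x xs ih =>
    rw [firstIdx?] at h
    by_cases hx : PySem.Str.strIsspace x = true
    · rw [if_pos hx] at h
      cases hxs : firstIdx? xs with
      | none => simp [hxs] at h
      | some g =>
        simp [hxs] at h
        obtain ⟨h1, h2, h3⟩ := ih g hxs
        subst h
        refine ⟨by simpa using h1, by simpa using h2, ?_⟩
        intro j hj
        match j with
        | 0 => simpa using hx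
        | j + 1 => simpa using h3 j (by omega)
    · rw [if_neg hx] at h
      simp at h
      subst h
      exact ⟨by simp, by simpa using eq_false_of_ne_true hx, by intro j hj; omega⟩

lemma lastIdx?_eq_none (xs : List String) (h : lastIdx? xs = none) :
    ∀ x ∈ xs, PySem.Str.strIsspace x = true := by
  induction xs with
  | nil => simp
  | cons x xs ih =>
    rw [lastIdx?] at h
    cases hxs : lastIdx? xs with
    | some k => simp [hxs] at h
    | none =>
      rw [hxs] at h
      by_cases hx : PySem.Str.strIsspace x = true
      · intro y hy
        rcases List.mem_cons.1 hy with rfl | hy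
        · exact hx
        · exact ih hxs y hy
      · rw [if_neg hx] at h; simp at h

lemma lastIdx?_spec (xs : List String) (L : Nat) (h : lastIdx? xs = some L) :
    L < xs.length ∧ PySem.Str.strIsspace (xs.getD L "") = false ∧
      ∀ j, L < j → j < xs.length → PySem.Str.strIsspace (xs.getD j "") = true := by
  induction xs generalizing L with
  | nil => simp [lastIdx?] at h
  | cons x xs ih =>
    rw [lastIdx?] at h
    cases hxs : lastIdx? xs with
    | some k =>
      simp [hxs] at h
      subst h
      obtain ⟨h1, h2, h3⟩ := ih k hxs
      refine ⟨by simpa using h1, by simpa using h2, ?_⟩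
      intro j hj hjl
      match j with
      | 0 => omega
      | j + 1 => simpa using h3 j (by omega) (by simpa using hjl)
    | none =>
      rw [hxs] at h
      by_cases hx : PySem.Str.strIsspace x = true
      · rw [if_pos hx] at h; simp at h
      · rw [if_neg hx] at h; simp at h
        subst h
        refine ⟨by simp, by simpa using eq_false_of_ne_true hx, ?_⟩
        intro j hj hjl
        match j with
        | 0 => omega
        | j + 1 =>
          have := lastIdx?_eq_none xs hxs (xs.getD j "") ?_
          · simpa using this
          · rw [List.getD_eq_getElem _ _ (by simpa using hjl)]; exact List.getElem_mem _


lemma intercalate_nil_flatten (l : List (List Char)) : List.intercalate [] l = l.flatten := by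
  simp only [List.intercalate]
  induction l with
  | nil => simp
  | cons a l ih =>
    cases l with
    | nil => simp
    | cons b t => simpa [List.intersperse_cons₂] using ih

lemma guard_of_all_space (arr : List String) (hne : arr ≠ [])
    (h : ∀ x ∈ arr, PySem.Str.strIsspace x = true) :
    PySem.Str.strIsspace (PySem.Str.join "" arr) = true := by
  rw [PySem.Str.strIsspace_eq, PySem.Str.toList_join]
  have hj : PySem.Chars.join "".toList (arr.map String.toList) = (arr.map String.toList).flatten := by
    simp [PySem.Chars.join, intercalate_nil_flatten]
  rw [hj]
  rw [PySem.Chars.strIsspace]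
  simp only [Bool.and_eq_true, Bool.not_eq_true']
  constructor
  · -- flatten nonempty: head of arr is isspace hence nonempty
    cases arr with
    | nil => exact absurd rfl hne
    | cons x xs =>
      have hx := h x (by simp)
      rw [PySem.Str.strIsspace_eq, PySem.Chars.strIsspace] at hx
      simp only [Bool.and_eq_true, Bool.not_eq_true'] at hx
      simp only [List.map_cons, List.flatten_cons, List.isEmpty_eq_false_iff, ne_eq]
      intro hc
      rcases List.append_eq_nil_iff.1 hc with ⟨h1, _⟩
      simp [h1] at hx
  · rw [List.all_eq_true]
    intro c hc
    rw [List.mem_flatten] at hc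
    obtain ⟨cs, hcs, hcmem⟩ := hc
    rw [List.mem_map] at hcs
    obtain ⟨x, hx, rfl⟩ := hcs
    have := h x hx
    rw [PySem.Str.strIsspace_eq, PySem.Chars.strIsspace] at this
    simp only [Bool.and_eq_true, List.all_eq_true] at this
    exact this.2 c hcmem


lemma loopL_eq (arr : List String) (f : Nat) (hlt : f < arr.length)
    (hsp : PySem.Str.strIsspace (arr.getD f "") = false)
    (hbef : ∀ j < f, PySem.Str.strIsspace (arr.getD j "") = true) :
    ∀ l : Nat, l ≤ f → trimLoopL arr ((arr.length : Int) - 1) (l : Int) = (f : Int) := by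
  intro l hl
  induction hd : f - l generalizing l with
  | zero =>
    have : l = f := by omega
    subst this
    rw [trimLoopL, dif_neg]
    rintro ⟨h1, h2⟩
    rw [show ((l : Int)) = ((l : Nat) : Int) from rfl, PySem.List.pyGetD_natCast] at h2
    rw [hsp] at h2
    exact Bool.false_ne_true h2
  | succ d ih =>
    have hlf : l < f := by omega
    rw [trimLoopL, dif_pos]
    · have : ((l : Int) + 1) = ((l + 1 : Nat) : Int) := by push_cast; ring
      rw [this]
      exact ih (l + 1) (by omega) (by omega)
    · constructor
      · have : (f : Int) ≤ (arr.length : Int) - 1 := by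
          have := hlt; omega
        omega
      · rw [PySem.List.pyGetD_natCast]
        exact hbef l hlf

lemma loopR_eq (arr : List String) (L : Nat) (hlt : L < arr.length)
    (hsp : PySem.Str.strIsspace (arr.getD L "") = false)
    (haft : ∀ j, L < j → j < arr.length → PySem.Str.strIsspace (arr.getD j "") = true)
    (f : Nat) (hfL : f ≤ L) :
    ∀ r : Nat, L ≤ r → r < arr.length → trimLoopR arr (f : Int) (r : Int) = (L : Int) := by
  intro r hr hrn
  induction hd : r - L generalizing r with
  | zero =>
    have : r = L := by omega
    subst this
    rw [trimLoopR, dif_neg]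
    rintro ⟨h1, h2⟩
    rw [PySem.List.pyGetD_natCast, hsp] at h2
    exact Bool.false_ne_true h2
  | succ d ih =>
    have hLr : L < r := by omega
    rw [trimLoopR, dif_pos]
    · have : ((r : Int) - 1) = ((r - 1 : Nat) : Int) := by omega
      rw [this]
      exact ih (r - 1) (by omega) (by omega) (by omega)
    · exact ⟨by omega, by rw [PySem.List.pyGetD_natCast]; exact haft r hLr hrn⟩


lemma fold_fst (xs : List String) (s : Int) (st : Option Int × Option Int) :
    ((PySem.List.enumerate xs s).foldl bStep st).1 =
      match st.1 with
      | some f0 => some f0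
      | none => (firstIdx? xs).map (fun k => s + k) := by
  induction xs generalizing s st with
  | nil =>
    simp [PySem.List.enumerate_nil, firstIdx?]
    cases st.1 <;> simp
  | cons x xs ih =>
    rw [PySem.List.enumerate_cons, List.foldl_cons, ih, firstIdx?]
    by_cases hx : PySem.Str.strIsspace x = true
    · rw [if_pos hx]
      have hx2 : PySem.Chars.strIsspace x.toList = true := by rw [← PySem.Str.strIsspace_eq]; exact hx
      have hb : bStep st (s, x) = st := by simp [bStep, hx2]
      rw [hb]
      cases hst : st.1 with
      | some f0 => simp
      | none =>
        simp only
        cases hf : firstIdx? xs <;> simp <;> ring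
    · rw [if_neg hx]
      have hb : bStep st (s, x) =
          ((match st.1 with | none => some s | some f => some f), some s) := by
        have hx2 : PySem.Chars.strIsspace x.toList = false := by
          rw [← PySem.Str.strIsspace_eq]; exact eq_false_of_ne_true hx
        simp [bStep, hx2]
      rw [hb]
      cases hst : st.1 with
      | some f0 => simp
      | none => simp

lemma fold_snd (xs : List String) (s : Int) (st : Option Int × Option Int) :
    ((PySem.List.enumerate xs s).foldl bStep st).2 =
      match lastIdx? xs with
      | some k => some (s + k)
      | none => st.2 := by
  induction xs generalizing s st with
  | nil =>
    simp [PySem.List.enumerate_nil, lastIdx?]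
  | cons x xs ih =>
    rw [PySem.List.enumerate_cons, List.foldl_cons, ih, lastIdx?]
    by_cases hx : PySem.Str.strIsspace x = true
    · have hx2 : PySem.Chars.strIsspace x.toList = true := by rw [← PySem.Str.strIsspace_eq]; exact hx
      have hb : bStep st (s, x) = st := by simp [bStep, hx2]
      rw [hb]
      cases hl : lastIdx? xs with
      | some k => simp; ring
      | none => simp [hx2]
    · have hx2 : PySem.Chars.strIsspace x.toList = false := by
        rw [← PySem.Str.strIsspace_eq]; exact eq_false_of_ne_true hx
      have hb : (bStep st (s, x)).2 = some s := by
        simp [bStep, hx2]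
      cases hl : lastIdx? xs with
      | some k => simp; ring
      | none => simp [hx2, hb]

-- ===== VERDICT (by name: the statement is the Claim_ definition above) =====
theorem trim_side_spec : Claim_equal_trim_side := by
  intro arr _
  unfold Spec_trim_side
  rw [trim_side, trim_side_alt]
  by_cases hg : PySem.Str.strIsspace (PySem.Str.join "" arr) = true
  · rw [if_pos hg, if_pos hg]
  · rw [if_neg hg, if_neg hg]
    cases hf : firstIdx? arr with
    | none =>
      cases harr : arr with
      | nil =>
        rw [trimLoopL]
        simp only [List.length_nil, Nat.cast_zero, zero_sub]
        rw [dif_neg (by rintro ⟨h1, _⟩; omega)]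
        rw [trimLoopR]
        rw [dif_neg (by rintro ⟨h1, _⟩; omega)]
        simp [PySem.List.enumerate_nil, PySem.List.slice]
      | cons y ys =>
        exact absurd (guard_of_all_space arr (by rw [harr]; simp)
          (firstIdx?_eq_none arr hf)) hg
    | some f =>
      cases hl : lastIdx? arr with
      | none =>
        obtain ⟨h1, h2, _⟩ := firstIdx?_spec arr f hf
        have := lastIdx?_eq_none arr hl (arr.getD f "") (by
          rw [List.getD_eq_getElem _ _ h1]; exact List.getElem_mem _)
        rw [this] at h2
        exact absurd h2 (by simp)
      | some L =>
        obtain ⟨hf1, hf2, hf3⟩ := firstIdx?_spec arr f hf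
        obtain ⟨hL1, hL2, hL3⟩ := lastIdx?_spec arr L hl
        have hfL : f ≤ L := by
          by_contra hc
          have := hL3 f (by omega) hf1
          rw [this] at hf2
          exact absurd hf2 (by simp)
        have hA1 : trimLoopL arr ((arr.length : Int) - 1) 0 = (f : Int) := by
          simpa using loopL_eq arr f hf1 hf2 hf3 0 (Nat.zero_le f)
        have hcast : ((arr.length : Int) - 1) = ((arr.length - 1 : Nat) : Int) := by
          omega
        have hA2 : trimLoopR arr (f : Int) ((arr.length : Int) - 1) = (L : Int) := by
          rw [hcast]
          exact loopR_eq arr L hL1 hL2 hL3 f hfL (arr.length - 1) (by omega) (by omega)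
        have hB1 : ((PySem.List.enumerate arr 0).foldl bStep (none, none)).1 = some (f : Int) := by
          rw [fold_fst, hf]; simp
        have hB2 : ((PySem.List.enumerate arr 0).foldl bStep (none, none)).2 = some (L : Int) := by
          rw [fold_snd, hl]; simp
        simp only [hA1, hA2, hB1, hB2]
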